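-- pv_equiv track=rewrite | github.com/weaviate/elysia | example-data/processing/save_data_as_csv.py | remove_empty_headers
-- ===== SOURCE A (Python) =====
-- def remove_empty_headers(text):
--     lines = text.split("\n")
--     newlines = []
--     i = 0
--     while i < len(lines):
--         if lines[i].startswith("##"):
--             j = i + 1
--             while j < len(lines):
--                 if len(lines[j].strip()) == 0:
--                     j += 1
--                 elif lines[j].startswith("##"):
--                     i = j - 1
--                     break
--                 else:
--                     newlines.append(lines[i])
--                     break
--             else:
--                 newlines.extend(lines[i:j])
--
--         else:
--             newlines.append(lines[i])
--         i += 1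
--     return "\n".join(newlines)
-- ===== SOURCE B (Python) =====
-- def remove_empty_headers(text):
--     lines = text.split("\n")
--     kept = []
--     blanks = []          # blank lines seen since the last non-blank line below (bottom-up order)
--     below_is_header = False  # nearest non-blank line below starts with '##'
--     for line in reversed(lines):
--         if line.strip() == "":
--             blanks.append(line)
--         elif line.startswith("##") and below_is_header:
--             blanks = []          # drop the header and the blanks between it and the next header
--         else:
--             kept = [line] + blanks[::-1] + kept
--             blanks = []
--             below_is_header = line.startswith("##")
--     return "\n".join(blanks[::-1] + kept)
-- ===== Notes on version B (the rewrite author's own statement) =====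
-- stated objective: alternative
-- what changed: A's forward index loop with an inner look-ahead scan (and for-else extend) is replaced by a single reverse pass maintaining a blank-line buffer and a 'nearest non-blank line below starts with ##' flag, filtering each line exactly once.
-- intended difference: On texts whose last line is blank and whose last non-blank line starts with '##' (a trailing header followed only by blanks), A's for-else extends header+blanks and then re-appends each of those blanks again (duplicating them), while B keeps the header and each blank once, the intended 'keep an EOF header' behaviour. — e.g. on remove_empty_headers("## h\n"): A returns "## h\n\n", B returns "## h\n"
import Mathlib
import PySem

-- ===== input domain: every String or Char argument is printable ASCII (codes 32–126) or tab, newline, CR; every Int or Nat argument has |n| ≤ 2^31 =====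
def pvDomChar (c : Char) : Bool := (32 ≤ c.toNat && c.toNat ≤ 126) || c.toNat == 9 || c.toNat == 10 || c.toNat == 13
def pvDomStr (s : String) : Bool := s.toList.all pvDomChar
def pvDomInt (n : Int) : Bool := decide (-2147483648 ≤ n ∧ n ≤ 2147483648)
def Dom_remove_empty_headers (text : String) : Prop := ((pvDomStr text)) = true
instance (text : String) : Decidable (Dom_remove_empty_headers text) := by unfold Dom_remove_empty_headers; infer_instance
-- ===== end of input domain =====

-- B rewrites A as a single reverse pass with a state machine (blank buffer + "nearest non-blank below is a header"
-- flag) instead of A's forward index loop with an inner look-ahead scan; on a trailing '##' header followed only by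
-- blank lines up to EOF, A duplicates those blanks (its for-else extend) while B keeps them once — see D_ below.

-- ===== PORT A =====
inductive PvScanA where
  | exhausted (j : Nat)
  | header (j : Nat)
  | content
deriving DecidableEq, Repr

-- inner 'while j < len(lines)' loop of A: skip blank lines, report what stopped the scan.
-- fuel only makes the recursion structural; with fuel ≥ len(lines) - j it never runs out.
def pvScanA (lines : List String) : Nat → Nat → PvScanA
  | 0, j => .exhausted j
  | fuel + 1, j =>
    if j < lines.length then
      if PySem.Str.len (PySem.Str.strip (lines.getD j "")) == 0 then pvScanA lines fuel (j + 1)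
      else if PySem.Str.startswith (lines.getD j "") "##" then .header j
      else .content
    else .exhausted j

-- outer 'while i < len(lines)' loop of A (fuel as above: i grows by at least 1 each iteration)
def pvLoopA (lines : List String) : Nat → Nat → List String → List String
  | 0, _, newlines => newlines
  | fuel + 1, i, newlines =>
    if i < lines.length then
      if PySem.Str.startswith (lines.getD i "") "##" then
        match pvScanA lines lines.length (i + 1) with
        | .exhausted j => pvLoopA lines fuel (i + 1) (newlines ++ PySem.List.slice lines (some (i : Int)) (some (j : Int)))
        | .header j => pvLoopA lines fuel ((j - 1) + 1) newlines      -- i = j - 1; then i += 1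
        | .content => pvLoopA lines fuel (i + 1) (newlines ++ [lines.getD i ""])
      else pvLoopA lines fuel (i + 1) (newlines ++ [lines.getD i ""])
    else newlines

def remove_empty_headers (text : String) : String :=
  -- text.split("\n"): sep ≠ "" so split? is always some; getD is exact here
  let lines := (PySem.Str.split? text "\n").getD []
  PySem.Str.join "\n" (pvLoopA lines (lines.length + 1) 0 [])

-- ===== PORT B =====
-- one step of B's reverse pass; state = (kept, blanks, below_is_header)
def pvStepB (st : List String × List String × Bool) (line : String) : List String × List String × Bool :=
  if PySem.Str.strip line == "" then (st.1, st.2.1 ++ [line], st.2.2)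
  else if PySem.Str.startswith line "##" && st.2.2 then (st.1, [], st.2.2)
  else (line :: (st.2.1.reverse ++ st.1), [], PySem.Str.startswith line "##")

def remove_empty_headers_alt (text : String) : String :=
  let lines := (PySem.Str.split? text "\n").getD []   -- text.split("\n"), sep ≠ ""
  let st := lines.reverse.foldl pvStepB ([], [], false)
  PySem.Str.join "\n" (st.2.1.reverse ++ st.1)

-- ===== PRECONDITION & SPEC =====
-- On texts whose last line is blank and whose last non-blank line starts with "##" (a trailing '##' header followed
-- only by blank lines), A's for-else extends the header and those blanks and then re-appends each blank again
-- (duplicating them), while B keeps the header and each blank once, the intended "keep an EOF header" behaviour.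
def D_remove_empty_headers (text : String) : Prop :=
  '\n' ∈ text.toList.reverse.takeWhile PySem.Chars.isspace ∧
  ['#', '#'] <+: ((text.toList.reverse.dropWhile PySem.Chars.isspace).takeWhile (· ≠ '\n')).reverse
instance (text : String) : Decidable (D_remove_empty_headers text) := by
  unfold D_remove_empty_headers; infer_instance

def Spec_remove_empty_headers (text : String) (out : String) : Prop :=
  ¬ D_remove_empty_headers text → out = remove_empty_headers_alt text
instance (text : String) (out : String) : Decidable (Spec_remove_empty_headers text out) := by
  unfold Spec_remove_empty_headers; infer_instance

def pvDiffWitness_remove_empty_headers : String := "## h\n"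
def pvDiffWitnessOut_remove_empty_headers : String × String := ("## h\n\n", "## h\n")

-- ===== CLAIM (what is proved, stated in full; the proofs are below) =====
def Claim_unchanged_remove_empty_headers : Prop := ∀ (text : String), Dom_remove_empty_headers text → Spec_remove_empty_headers text (remove_empty_headers text)
def Claim_changed_remove_empty_headers : Prop := Dom_remove_empty_headers (pvDiffWitness_remove_empty_headers) ∧ D_remove_empty_headers (pvDiffWitness_remove_empty_headers) ∧ remove_empty_headers (pvDiffWitness_remove_empty_headers) = pvDiffWitnessOut_remove_empty_headers.1 ∧ remove_empty_headers_alt (pvDiffWitness_remove_empty_headers) = pvDiffWitnessOut_remove_empty_headers.2 ∧ pvDiffWitnessOut_remove_empty_headers.1 ≠ pvDiffWitnessOut_remove_empty_headers.2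
def Claim_exact_remove_empty_headers : Prop := ∀ (text : String), Dom_remove_empty_headers text → D_remove_empty_headers text → remove_empty_headers text ≠ remove_empty_headers_alt text

-- ===== LEMMAS AND PROOFS =====

def pvBlank (l : String) : Bool := PySem.Str.strip l == ""
def pvHdr (l : String) : Bool := PySem.Str.startswith l "##"

-- "ends in a header followed only by blanks", phrased over the split line list
def pvDl (xs : List String) : Prop :=
  pvBlank (xs.reverse.getD 0 "x") = true ∧ pvHdr ((xs.reverse.dropWhile pvBlank).headD "") = true

-- common specification of the kept lines, recursion on the line list
def pvS : List String → List String
  | [] => []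
  | l :: rest =>
    if pvHdr l = true ∧ pvHdr ((rest.dropWhile pvBlank).headD "") = true
    then pvS (rest.dropWhile pvBlank)
    else l :: pvS rest
termination_by ls => ls.length
decreasing_by
  · have := (List.dropWhile_sublist (p := pvBlank) (l := rest)).length_le
    simp; omega
  · simp

theorem pvS_nil : pvS [] = [] := by rw [pvS]

theorem pvS_cons (l : String) (rest : List String) :
    pvS (l :: rest) =
      if pvHdr l = true ∧ pvHdr ((rest.dropWhile pvBlank).headD "") = true
      then pvS (rest.dropWhile pvBlank)
      else l :: pvS rest := by
  rw [pvS]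

theorem pvHdr_empty : pvHdr "" = false := by decide

theorem pvBlank_iff (l : String) : pvBlank l = true ↔ PySem.Chars.strip l.toList = [] := by
  unfold pvBlank
  rw [beq_iff_eq]
  constructor
  · intro h; rw [← PySem.Str.toList_strip, h]; rfl
  · intro h
    have h2 : (PySem.Str.strip l).toList = [] := by rw [PySem.Str.toList_strip, h]
    exact String.toList_inj.1 (by simp [h2])

theorem pvLenTest_eq (l : String) :
    (PySem.Str.len (PySem.Str.strip l) == 0) = pvBlank l := by
  by_cases hb : pvBlank l = true
  · rw [hb]
    have h := (pvBlank_iff l).1 hb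
    simp [PySem.Str.len_eq, PySem.Str.toList_strip, h]
  · rw [Bool.not_eq_true] at hb
    rw [hb]
    have h : PySem.Chars.strip l.toList ≠ [] := fun hh => by
      rw [(pvBlank_iff l).2 hh] at hb; cases hb
    simp only [PySem.Str.len_eq, PySem.Str.toList_strip, beq_eq_false_iff_ne, ne_eq]
    intro hh
    exact h (List.length_eq_zero_iff.1 (by exact_mod_cast hh))

theorem pv_mem_dropWhile {α : Type} (p : α → Bool) (x : α) (xs : List α)
    (h : x ∈ xs) (hp : p x = false) : x ∈ xs.dropWhile p := by
  have hsplit := List.takeWhile_append_dropWhile (p := p) (l := xs)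
  rw [← hsplit] at h
  rcases List.mem_append.1 h with h1 | h1
  · exact absurd (List.mem_takeWhile_imp h1) (by simp [hp])
  · exact h1

theorem pvHdr_not_blank (l : String) (h : pvHdr l = true) : pvBlank l = false := by
  unfold pvHdr at h
  rw [PySem.Str.startswith_eq, PySem.Chars.startswith_iff] at h
  obtain ⟨t, ht⟩ := h
  have hx : '#' ∈ l.toList := by rw [← ht]; exact List.mem_append_left _ (by decide)
  have h1 : '#' ∈ PySem.Chars.lstrip l.toList := by
    unfold PySem.Chars.lstrip
    exact pv_mem_dropWhile _ _ _ hx (by decide)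
  have h2 : '#' ∈ PySem.Chars.strip l.toList := by
    unfold PySem.Chars.strip PySem.Chars.rstrip
    rw [List.mem_reverse]
    exact pv_mem_dropWhile _ _ _ (List.mem_reverse.2 h1) (by decide)
  rw [Bool.eq_false_iff]
  intro hb
  rw [(pvBlank_iff l).1 hb] at h2
  cases h2

-- takeWhile/dropWhile of a list whose first m elements satisfy p and whose m-th does not
theorem pvTakeDropWhile (p : String → Bool) (xs : List String) (m : Nat) (hm : m ≤ xs.length)
    (hall : ∀ k, k < m → p (xs.getD k "") = true)
    (hstop : m = xs.length ∨ p (xs.getD m "") = false) :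
    xs.takeWhile p = xs.take m ∧ xs.dropWhile p = xs.drop m := by
  induction xs generalizing m with
  | nil =>
    have : m = 0 := by simpa using hm
    subst this; simp
  | cons x t ih =>
    cases m with
    | zero =>
      have hx : p x = false := by
        rcases hstop with h | h
        · simp at h
        · simpa using h
      simp [hx]
    | succ m' =>
      have hx : p x = true := by simpa using hall 0 (Nat.succ_pos _)
      have ih' := ih m' (by simpa using hm)
        (fun k hk => by simpa using hall (k + 1) (by omega))
        (by rcases hstop with h | h
            · left; simpa using h
            · right; simpa using h)
      simp [hx, ih'.1, ih'.2]

theorem pvScanA_exhausted_spec (lines : List String) (fuel j0 j : Nat)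
    (hf : lines.length ≤ fuel + j0) (hj0 : j0 ≤ lines.length)
    (h : pvScanA lines fuel j0 = .exhausted j) :
    j = lines.length ∧ ∀ k, j0 ≤ k → k < lines.length → pvBlank (lines.getD k "") = true := by
  induction fuel generalizing j0 with
  | zero =>
    cases h
    exact ⟨by omega, fun k hk1 hk2 => absurd hk2 (by omega)⟩
  | succ fuel ih =>
    simp only [pvScanA] at h
    split at h
    · split at h
      · rename_i hlt hbl
        obtain ⟨hj, hb⟩ := ih (j0 + 1) (by omega) (by omega) h
        refine ⟨hj, fun k hk1 hk2 => ?_⟩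
        rcases Nat.eq_or_lt_of_le hk1 with rfl | hk
        · rw [← pvLenTest_eq]; exact hbl
        · exact hb k hk hk2
      · split at h
        · cases h
        · cases h
    · cases h
      exact ⟨by omega, fun k hk1 hk2 => absurd hk2 (by omega)⟩

theorem pvScanA_header_spec (lines : List String) (fuel j0 j : Nat)
    (h : pvScanA lines fuel j0 = .header j) :
    j0 ≤ j ∧ j < lines.length ∧ pvHdr (lines.getD j "") = true ∧
      ∀ k, j0 ≤ k → k < j → pvBlank (lines.getD k "") = true := by
  induction fuel generalizing j0 with
  | zero => cases h
  | succ fuel ih =>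
    simp only [pvScanA] at h
    split at h
    · split at h
      · rename_i hlt hbl
        obtain ⟨hj1, hj2, hj3, hb⟩ := ih (j0 + 1) h
        refine ⟨by omega, hj2, hj3, fun k hk1 hk2 => ?_⟩
        rcases Nat.eq_or_lt_of_le hk1 with rfl | hk
        · rw [← pvLenTest_eq]; exact hbl
        · exact hb k hk hk2
      · split at h
        · rename_i hlt hbl hsw
          cases h
          exact ⟨Nat.le_refl _, hlt, hsw, fun k hk1 hk2 => absurd hk2 (by omega)⟩
        · cases h
    · cases h

theorem pvScanA_content_spec (lines : List String) (fuel j0 : Nat)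
    (h : pvScanA lines fuel j0 = .content) :
    ∃ j, j0 ≤ j ∧ j < lines.length ∧ pvBlank (lines.getD j "") = false ∧
      pvHdr (lines.getD j "") = false ∧ ∀ k, j0 ≤ k → k < j → pvBlank (lines.getD k "") = true := by
  induction fuel generalizing j0 with
  | zero => cases h
  | succ fuel ih =>
    simp only [pvScanA] at h
    split at h
    · split at h
      · rename_i hlt hbl
        obtain ⟨j, hj1, hj2, hj3, hj4, hb⟩ := ih (j0 + 1) h
        refine ⟨j, by omega, hj2, hj3, hj4, fun k hk1 hk2 => ?_⟩
        rcases Nat.eq_or_lt_of_le hk1 with rfl | hk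
        · rw [← pvLenTest_eq]; exact hbl
        · exact hb k hk hk2
      · split at h
        · cases h
        · rename_i hlt hbl hsw
          refine ⟨j0, Nat.le_refl _, hlt, by rw [← pvLenTest_eq]; simpa using hbl,
            by simpa using hsw, fun k hk1 hk2 => absurd hk2 (by omega)⟩
    · cases h

theorem pvS_blank_prefix (pre t : List String) (h : ∀ x ∈ pre, pvBlank x = true) :
    pvS (pre ++ t) = pre ++ pvS t := by
  induction pre with
  | nil => simp
  | cons b pre' ih =>
    have hb : pvBlank b = true := h b (by simp)
    have hh : pvHdr b = false := by
      rw [Bool.eq_false_iff]; intro hc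
      rw [pvHdr_not_blank b hc] at hb; cases hb
    rw [List.cons_append, pvS_cons, if_neg (by simp [hh]), ih (fun x hx => h x (by simp [hx]))]
    simp

theorem pv_getD_drop (xs : List String) (m k : Nat) : (xs.drop m).getD k "" = xs.getD (m + k) "" := by
  simp [List.getD, List.getElem?_drop]

-- what A actually keeps: like pvS, except that a header whose whole tail is blank
-- is emitted together with that tail and then the tail is emitted AGAIN
def pvA : List String → List String
  | [] => []
  | l :: rest =>
    if pvHdr l = true then
      if pvHdr ((rest.dropWhile pvBlank).headD "") = true then pvA (rest.dropWhile pvBlank)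
      else if rest.dropWhile pvBlank = [] then (l :: rest) ++ rest
      else l :: pvA rest
    else l :: pvA rest
termination_by ls => ls.length
decreasing_by
  · have := (List.dropWhile_sublist (p := pvBlank) (l := rest)).length_le
    simp; omega
  · simp
  · simp

theorem pvA_nil : pvA [] = [] := by rw [pvA]

theorem pvA_cons (l : String) (rest : List String) :
    pvA (l :: rest) =
      if pvHdr l = true then
        if pvHdr ((rest.dropWhile pvBlank).headD "") = true then pvA (rest.dropWhile pvBlank)
        else if rest.dropWhile pvBlank = [] then (l :: rest) ++ rest
        else l :: pvA rest
      else l :: pvA rest := by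
  rw [pvA]

theorem pv_blank_not_hdr (l : String) (h : pvBlank l = true) : pvHdr l = false := by
  rw [Bool.eq_false_iff]
  intro hc
  rw [pvHdr_not_blank l hc] at h
  cases h

theorem pvA_blank_id (xs : List String) (h : ∀ x ∈ xs, pvBlank x = true) : pvA xs = xs := by
  induction xs with
  | nil => exact pvA_nil
  | cons b rest ih =>
    rw [pvA_cons, if_neg (by simp [pv_blank_not_hdr b (h b (by simp))])]
    rw [ih (fun x hx => h x (by simp [hx]))]

theorem pvS_blank_id (xs : List String) (h : ∀ x ∈ xs, pvBlank x = true) : pvS xs = xs := by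
  have := pvS_blank_prefix xs [] h
  simpa [pvS_nil] using this

theorem pvBall_drop (lines : List String) (i : Nat)
    (hb : ∀ k, i ≤ k → k < lines.length → pvBlank (lines.getD k "") = true) :
    ∀ x ∈ lines.drop i, pvBlank x = true := by
  intro x hx
  obtain ⟨k, hk, hkx⟩ := List.mem_iff_getElem.1 hx
  rw [List.getElem_drop] at hkx
  subst hkx
  rw [← List.getD_eq_getElem lines "" (by simp at hk; omega)]
  exact hb (i + k) (by omega) (by simp at hk; omega)

theorem pvLoopA_eq (lines : List String) :
    ∀ fuel i acc, lines.length < fuel + i → pvLoopA lines fuel i acc = acc ++ pvA (lines.drop i) := by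
  intro fuel
  induction fuel with
  | zero =>
    intro i acc hfi
    rw [pvLoopA, List.drop_eq_nil_of_le (by omega), pvA_nil, List.append_nil]
  | succ fuel ih =>
    intro i acc hfi
    rw [pvLoopA]
    by_cases hi : i < lines.length
    · rw [if_pos hi]
      by_cases hh : PySem.Str.startswith (lines.getD i "") "##" = true
      · rw [if_pos hh]
        have hhe : pvHdr (lines[i]) = true := by
          rw [← List.getD_eq_getElem lines "" hi]; exact hh
        cases hs : pvScanA lines lines.length (i + 1) with
        | exhausted j =>
          show pvLoopA lines fuel (i + 1) (acc ++ PySem.List.slice lines (some (i : Int)) (some (j : Int))) = acc ++ pvA (lines.drop i)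
          -- inner while exhausted: the whole tail i+1.. is blank; A extends lines[i:j] and
          -- then appends each of those blanks again in the following iterations
          obtain ⟨hj, hblank⟩ := pvScanA_exhausted_spec lines lines.length (i + 1) j (by omega) (by omega) hs
          have hball : ∀ x ∈ lines.drop (i + 1), pvBlank x = true :=
            pvBall_drop lines (i + 1) (fun k hk1 hk2 => hblank k hk1 hk2)
          have hslice : PySem.List.slice lines (some (i : Int)) (some (j : Int)) = lines.drop i := by
            have h1 : PySem.List.slice lines (some (i : Int)) (some (j : Int)) = (lines.drop i).take (j - i) := by
              simp only [Nat.cast_nonneg, PySem.List.slice_toNat, Int.toNat_natCast]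
            rw [h1]
            exact List.take_of_length_le (by simp; omega)
          have hdwn : (lines.drop (i + 1)).dropWhile pvBlank = [] :=
            List.dropWhile_eq_nil_iff.2 hball
          rw [ih (i + 1) _ (by omega), hslice, pvA_blank_id _ hball]
          conv_rhs => rw [List.drop_eq_getElem_cons hi, pvA_cons]
          rw [if_pos hhe, hdwn]
          rw [if_neg (by simp [pvHdr_empty]), if_pos rfl]
          rw [List.drop_eq_getElem_cons hi]
          simp
        | header j =>
          show pvLoopA lines fuel ((j - 1) + 1) acc = acc ++ pvA (lines.drop i)
          -- next non-blank is a header at j: lines i..j-1 are dropped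
          obtain ⟨hj1, hj2, hjh, hblank⟩ := pvScanA_header_spec lines lines.length (i + 1) j hs
          rw [ih ((j - 1) + 1) _ (by omega), show j - 1 + 1 = j by omega]
          congr 1
          have hdw : (lines.drop (i + 1)).dropWhile pvBlank = lines.drop j := by
            have hm : j - (i + 1) ≤ (lines.drop (i + 1)).length := by simp; omega
            have := (pvTakeDropWhile pvBlank (lines.drop (i + 1)) (j - (i + 1)) hm
              (fun k hk => by rw [pv_getD_drop]; exact hblank (i + 1 + k) (by omega) (by omega))
              (Or.inr (by rw [pv_getD_drop, show i + 1 + (j - (i + 1)) = j by omega]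
                          exact pvHdr_not_blank _ hjh))).2
            rw [this, List.drop_drop]
            congr 1; omega
          have hhead : (lines.drop j).headD "" = lines.getD j "" := by
            rw [List.drop_eq_getElem_cons hj2, List.getD_eq_getElem _ _ hj2]; rfl
          rw [List.drop_eq_getElem_cons hi, pvA_cons, if_pos hhe, hdw, hhead]
          rw [if_pos hjh]
        | content =>
          show pvLoopA lines fuel (i + 1) (acc ++ [lines.getD i ""]) = acc ++ pvA (lines.drop i)
          -- next non-blank is content: the header is kept
          obtain ⟨j, hj1, hj2, hnb, hnh, hblank⟩ := pvScanA_content_spec lines lines.length (i + 1) hs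
          rw [ih (i + 1) _ (by omega)]
          have hdw : (lines.drop (i + 1)).dropWhile pvBlank = lines.drop j := by
            have hm : j - (i + 1) ≤ (lines.drop (i + 1)).length := by simp; omega
            have := (pvTakeDropWhile pvBlank (lines.drop (i + 1)) (j - (i + 1)) hm
              (fun k hk => by rw [pv_getD_drop]; exact hblank (i + 1 + k) (by omega) (by omega))
              (Or.inr (by rw [pv_getD_drop, show i + 1 + (j - (i + 1)) = j by omega]; exact hnb))).2
            rw [this, List.drop_drop]
            congr 1; omega
          have hhead : (lines.drop j).headD "" = lines.getD j "" := by
            rw [List.drop_eq_getElem_cons hj2, List.getD_eq_getElem _ _ hj2]; rfl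
          have hne : lines.drop j ≠ [] := by
            intro hc
            have := congrArg List.length hc
            simp at this; omega
          conv_rhs => rw [List.drop_eq_getElem_cons hi, pvA_cons]
          rw [if_pos hhe, hdw, hhead]
          rw [if_neg (by rw [hnh]; simp), if_neg hne, ← List.getD_eq_getElem lines "" hi]
          simp
      · rw [if_neg hh, ih (i + 1) _ (by omega)]
        conv_rhs => rw [List.drop_eq_getElem_cons hi, pvA_cons]
        have hhf : pvHdr (lines[i]) = false := by
          rw [← List.getD_eq_getElem lines "" hi]
          simpa using hh
        rw [if_neg (by rw [hhf]; simp), ← List.getD_eq_getElem lines "" hi]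
        simp
    · rw [if_neg hi, List.drop_eq_nil_of_le (by omega), pvA_nil, List.append_nil]

theorem pvInvB (lines : List String) :
    (lines.reverse.foldl pvStepB ([], [], false)).2.1 = (lines.takeWhile pvBlank).reverse ∧
    (lines.reverse.foldl pvStepB ([], [], false)).2.1.reverse ++
      (lines.reverse.foldl pvStepB ([], [], false)).1 = pvS lines ∧
    (lines.reverse.foldl pvStepB ([], [], false)).2.2 = pvHdr ((lines.dropWhile pvBlank).headD "") := by
  induction lines with
  | nil => simp [pvS_nil, pvHdr_empty]
  | cons l rest ih =>
    obtain ⟨ih1, ih2, ih3⟩ := ih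
    rw [List.reverse_cons, List.foldl_append]
    set st := rest.reverse.foldl pvStepB ([], [], false) with hst
    simp only [List.foldl_cons, List.foldl_nil]
    by_cases hb : pvBlank l = true
    · -- blank line: buffered
      have hb' : (PySem.Str.strip l == "") = true := hb
      rw [pvStepB, if_pos hb']
      refine ⟨?_, ?_, ?_⟩
      · show st.2.1 ++ [l] = ((l :: rest).takeWhile pvBlank).reverse
        rw [List.takeWhile_cons, if_pos hb, List.reverse_cons, ih1]
      · show (st.2.1 ++ [l]).reverse ++ st.1 = pvS (l :: rest)
        rw [pvS_cons, if_neg (by rintro ⟨h1, -⟩; rw [pvHdr_not_blank l h1] at hb; cases hb)]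
        rw [List.reverse_append]
        simpa using ih2
      · show st.2.2 = pvHdr (((l :: rest).dropWhile pvBlank).headD "")
        rw [List.dropWhile_cons, if_pos hb]
        exact ih3
    · rw [Bool.not_eq_true] at hb
      have hb' : (PySem.Str.strip l == "") = false := hb
      rw [pvStepB, if_neg (by simp [hb'])]
      by_cases hdrop : (PySem.Str.startswith l "##" && st.2.2) = true
      · -- header with a header as next non-blank below: dropped with the blanks under it
        have hand := hdrop
        rw [Bool.and_eq_true] at hand
        obtain ⟨hhl, hfl⟩ := hand
        rw [if_pos hdrop]
        refine ⟨?_, ?_, ?_⟩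
        · show ([] : List String) = ((l :: rest).takeWhile pvBlank).reverse
          rw [List.takeWhile_cons, if_neg (by simp [hb])]
          rfl
        · show ([] : List String).reverse ++ st.1 = pvS (l :: rest)
          rw [pvS_cons, if_pos ⟨hhl, by rw [← ih3]; exact hfl⟩]
          have hsplit : rest = rest.takeWhile pvBlank ++ rest.dropWhile pvBlank :=
            (List.takeWhile_append_dropWhile (p := pvBlank) (l := rest)).symm
          have h2 : st.2.1.reverse ++ st.1
              = rest.takeWhile pvBlank ++ pvS (rest.dropWhile pvBlank) := by
            rw [ih2]
            conv_lhs => rw [hsplit]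
            exact pvS_blank_prefix _ _ (fun x hx => List.mem_takeWhile_imp hx)
          rw [ih1, List.reverse_reverse] at h2
          simpa using List.append_cancel_left h2
        · show st.2.2 = pvHdr (((l :: rest).dropWhile pvBlank).headD "")
          rw [List.dropWhile_cons, if_neg (by simp [hb])]
          rw [hfl]
          exact (show pvHdr l = true from hhl).symm
      · -- kept line (content, or a header whose next non-blank is content/EOF)
        rw [if_neg hdrop]
        refine ⟨?_, ?_, ?_⟩
        · show ([] : List String) = ((l :: rest).takeWhile pvBlank).reverse
          rw [List.takeWhile_cons, if_neg (by simp [hb])]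
          rfl
        · show ([] : List String).reverse ++ (l :: (st.2.1.reverse ++ st.1)) = pvS (l :: rest)
          rw [pvS_cons, if_neg (by
            rintro ⟨h1, h2⟩
            exact hdrop (by rw [Bool.and_eq_true, ih3]; exact ⟨h1, h2⟩))]
          rw [ih2]
          rfl
        · show PySem.Str.startswith l "##" = pvHdr (((l :: rest).dropWhile pvBlank).headD "")
          rw [List.dropWhile_cons, if_neg (by simp [hb])]
          rfl

-- ---- the change region pvDl, and how pvA and pvS relate on and off it ----

theorem pv_not_allblank_of_dropWhile_ne (xs : List String) (h : xs.dropWhile pvBlank ≠ []) :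
    ∃ x ∈ xs, pvBlank x = false := by
  refine ⟨(xs.dropWhile pvBlank).head h, ?_, List.head_dropWhile_not pvBlank h⟩
  exact (List.dropWhile_sublist (p := pvBlank) (l := xs)).mem (List.head_mem h)

theorem pvDl_not_of_allblank (xs : List String) (h : ∀ x ∈ xs, pvBlank x = true) :
    ¬ pvDl xs := by
  rintro ⟨-, h2⟩
  have hdw : xs.reverse.dropWhile pvBlank = [] :=
    List.dropWhile_eq_nil_iff.2 (fun x hx => h x (List.mem_reverse.1 hx))
  rw [hdw] at h2
  simp [pvHdr_empty] at h2

theorem pvDl_suffix_iff (s u : List String) (hnb : ∃ x ∈ s, pvBlank x = false) :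
    pvDl s ↔ pvDl (u ++ s) := by
  obtain ⟨x, hxm, hxb⟩ := hnb
  have hsne : s ≠ [] := by rintro rfl; cases hxm
  have hdwne : s.reverse.dropWhile pvBlank ≠ [] := by
    intro hc
    rw [List.dropWhile_eq_nil_iff] at hc
    rw [hc x (List.mem_reverse.2 hxm)] at hxb
    cases hxb
  unfold pvDl
  rw [List.reverse_append]
  rw [List.getD_append _ _ _ 0 (by simpa using List.length_pos_iff.2 hsne)]
  rw [List.dropWhile_append, if_neg (by simpa using hdwne)]
  have hhead : (s.reverse.dropWhile pvBlank ++ u.reverse).headD ""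
      = (s.reverse.dropWhile pvBlank).headD "" := by
    cases hdw : s.reverse.dropWhile pvBlank with
    | nil => exact absurd hdw hdwne
    | cons a tl => rfl
  rw [hhead]

theorem pvA_eq_pvS (xs : List String) (hnd : ¬ pvDl xs) : pvA xs = pvS xs := by
  induction xs using pvA.induct with
  | case1 => rw [pvA_nil, pvS_nil]
  | case2 l rest hl h1 ih =>
    -- header whose next non-blank is a header: both drop down to the tail
    have hne : rest.dropWhile pvBlank ≠ [] := by
      intro hc; rw [hc] at h1; simp [pvHdr_empty] at h1
    have hnb : ∃ x ∈ rest.dropWhile pvBlank, pvBlank x = false := by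
      refine ⟨(rest.dropWhile pvBlank).head hne, List.head_mem hne, ?_⟩
      exact List.head_dropWhile_not pvBlank hne
    have hu : (l :: rest.takeWhile pvBlank) ++ rest.dropWhile pvBlank = l :: rest := by
      rw [List.cons_append, List.takeWhile_append_dropWhile]
    have hnd' : ¬ pvDl (rest.dropWhile pvBlank) := by
      intro hc
      apply hnd
      have := (pvDl_suffix_iff _ (l :: rest.takeWhile pvBlank) hnb).1 hc
      rw [hu] at this
      exact this
    rw [pvA_cons, pvS_cons, if_pos hl, if_pos h1, if_pos ⟨hl, h1⟩, ih hnd']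
  | case3 l rest hl h1 h2 =>
    -- header whose whole tail is blank: inside ¬pvDl only possible with an empty tail
    by_cases hrest : rest = []
    · subst hrest
      rw [pvA_cons, pvS_cons, if_pos hl, if_neg h1, if_pos h2, if_neg (fun hc => h1 hc.2), pvS_nil]
      rfl
    · exfalso
      apply hnd
      have hball : ∀ x ∈ rest, pvBlank x = true := List.dropWhile_eq_nil_iff.1 h2
      constructor
      · show pvBlank ((l :: rest).reverse.getD 0 "x") = true
        rw [List.reverse_cons]
        have h0 : 0 < rest.reverse.length := by simpa using List.length_pos_iff.2 hrest
        rw [List.getD_append _ _ _ 0 h0, List.getD_eq_getElem _ _ h0]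
        exact hball _ (List.mem_reverse.1 (List.getElem_mem h0))
      · show pvHdr (((l :: rest).reverse.dropWhile pvBlank).headD "") = true
        rw [List.reverse_cons, List.dropWhile_append]
        rw [if_pos (by
          simp only [List.isEmpty_iff]
          exact List.dropWhile_eq_nil_iff.2 (fun x hx => hball x (List.mem_reverse.1 hx)))]
        rw [List.dropWhile_cons, if_neg (by rw [pvHdr_not_blank l hl]; simp)]
        exact hl
  | case4 l rest hl h1 h2 ih =>
    -- header kept (next non-blank is content)
    have hnb := pv_not_allblank_of_dropWhile_ne rest h2
    have hnd' : ¬ pvDl rest := by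
      intro hc
      exact hnd ((pvDl_suffix_iff rest [l] hnb).1 hc)
    rw [pvA_cons, pvS_cons, if_pos hl, if_neg h1, if_neg h2, if_neg (fun hc => h1 hc.2), ih hnd']
  | case5 l rest hl ih =>
    -- ordinary line
    have hnd' : ¬ pvDl rest := by
      by_cases hdw : rest.dropWhile pvBlank = []
      · exact pvDl_not_of_allblank rest (List.dropWhile_eq_nil_iff.1 hdw)
      · intro hc
        exact hnd ((pvDl_suffix_iff rest [l] (pv_not_allblank_of_dropWhile_ne rest hdw)).1 hc)
    rw [pvA_cons, pvS_cons, if_neg hl, if_neg (fun hc => hl hc.1), ih hnd']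

theorem pvA_extra (xs : List String) (hd : pvDl xs) :
    pvS xs ≠ [] ∧ ∃ t, t ≠ [] ∧ pvA xs = pvS xs ++ t := by
  induction xs using pvA.induct with
  | case1 =>
    exfalso
    rcases hd with ⟨h1, -⟩
    exact absurd h1 (by decide)
  | case2 l rest hl h1 ih =>
    have hne : rest.dropWhile pvBlank ≠ [] := by
      intro hc; rw [hc] at h1; simp [pvHdr_empty] at h1
    have hnb : ∃ x ∈ rest.dropWhile pvBlank, pvBlank x = false := by
      refine ⟨(rest.dropWhile pvBlank).head hne, List.head_mem hne, ?_⟩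
      exact List.head_dropWhile_not pvBlank hne
    have hu : (l :: rest.takeWhile pvBlank) ++ rest.dropWhile pvBlank = l :: rest := by
      rw [List.cons_append, List.takeWhile_append_dropWhile]
    have hd' : pvDl (rest.dropWhile pvBlank) := by
      rw [pvDl_suffix_iff _ (l :: rest.takeWhile pvBlank) hnb, hu]
      exact hd
    obtain ⟨hne', t, ht, heq⟩ := ih hd'
    rw [pvA_cons, pvS_cons, if_pos hl, if_pos h1, if_pos ⟨hl, h1⟩]
    exact ⟨hne', t, ht, heq⟩
  | case3 l rest hl h1 h2 =>
    -- the pvDl case itself: pvA repeats the blank tail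
    have hball : ∀ x ∈ rest, pvBlank x = true := List.dropWhile_eq_nil_iff.1 h2
    by_cases hrest : rest = []
    · -- rest = [] contradicts pvDl: the last line is the non-blank header itself
      exfalso
      subst hrest
      rcases hd with ⟨hb1, -⟩
      have hb2 : pvBlank l = true := hb1
      rw [pvHdr_not_blank l hl] at hb2
      cases hb2
    · rw [pvA_cons, pvS_cons, if_pos hl, if_neg h1, if_pos h2, if_neg (fun hc => h1 hc.2)]
      refine ⟨by simp, rest, hrest, ?_⟩
      rw [pvS_blank_id rest hball]
  | case4 l rest hl h1 h2 ih =>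
    have hnb := pv_not_allblank_of_dropWhile_ne rest h2
    have hd' : pvDl rest := by
      rw [pvDl_suffix_iff rest [l] hnb]
      exact hd
    obtain ⟨hne', t, ht, heq⟩ := ih hd'
    rw [pvA_cons, pvS_cons, if_pos hl, if_neg h1, if_neg h2, if_neg (fun hc => h1 hc.2), heq]
    exact ⟨by simp, t, ht, by simp⟩
  | case5 l rest hl ih =>
    have hdw : rest.dropWhile pvBlank ≠ [] := by
      intro hc
      have hball : ∀ x ∈ rest, pvBlank x = true := List.dropWhile_eq_nil_iff.1 hc
      rcases hd with ⟨-, h2c⟩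
      rw [List.reverse_cons, List.dropWhile_append] at h2c
      rw [if_pos (by
        simp only [List.isEmpty_iff]
        exact List.dropWhile_eq_nil_iff.2 (fun x hx => hball x (List.mem_reverse.1 hx)))] at h2c
      rw [List.dropWhile_cons] at h2c
      by_cases hbl : pvBlank l = true
      · rw [if_pos hbl] at h2c
        simp [pvHdr_empty] at h2c
      · rw [if_neg hbl] at h2c
        exact hl h2c
    have hd' : pvDl rest := by
      rw [pvDl_suffix_iff rest [l] (pv_not_allblank_of_dropWhile_ne rest hdw)]
      exact hd
    obtain ⟨hne', t, ht, heq⟩ := ih hd'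
    rw [pvA_cons, pvS_cons, if_neg hl, if_neg (fun hc => hl hc.1), heq]
    exact ⟨by simp, t, ht, by simp⟩

-- joining strictly more parts with "\n" gives a strictly longer string
theorem pvJoin_len_lt (u t : List (List Char)) (hu : u ≠ []) (ht : t ≠ []) :
    (PySem.Chars.join ['\n'] u).length < (PySem.Chars.join ['\n'] (u ++ t)).length := by
  induction u with
  | nil => cases hu rfl
  | cons x u' ih =>
    cases u' with
    | nil =>
      cases t with
      | nil => cases ht rfl
      | cons y t' =>
        rw [PySem.Chars.join_singleton, List.singleton_append, PySem.Chars.join_cons_cons]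
        simp
    | cons z u'' =>
      rw [PySem.Chars.join_cons_cons, List.cons_append, List.cons_append, PySem.Chars.join_cons_cons]
      have h2 := ih (by simp)
      rw [List.cons_append] at h2
      simp only [List.length_append]
      omega

theorem pvJoin_ne (u t : List String) (hu : u ≠ []) (ht : t ≠ []) :
    PySem.Str.join "\n" (u ++ t) ≠ PySem.Str.join "\n" u := by
  intro hc
  have h1 := congrArg String.toList hc
  rw [PySem.Str.toList_join, PySem.Str.toList_join] at h1
  have h2 := congrArg List.length h1
  rw [List.map_append] at h2
  have h3 := pvJoin_len_lt (u.map String.toList) (t.map String.toList)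
    (by simpa using hu) (by simpa using ht)
  rw [show ("\n".toList) = ['\n'] from rfl] at h2
  omega

theorem pvMain_eq (lines : List String) (h : ¬ pvDl lines) :
    PySem.Str.join "\n" (pvLoopA lines (lines.length + 1) 0 []) =
    PySem.Str.join "\n" ((lines.reverse.foldl pvStepB ([], [], false)).2.1.reverse ++
      (lines.reverse.foldl pvStepB ([], [], false)).1) := by
  rw [pvLoopA_eq lines _ 0 [] (by omega), List.drop_zero, List.nil_append,
    pvA_eq_pvS lines h, ← (pvInvB lines).2.1]

theorem pvMain_ne (lines : List String) (h : pvDl lines) :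
    PySem.Str.join "\n" (pvLoopA lines (lines.length + 1) 0 []) ≠
    PySem.Str.join "\n" ((lines.reverse.foldl pvStepB ([], [], false)).2.1.reverse ++
      (lines.reverse.foldl pvStepB ([], [], false)).1) := by
  obtain ⟨hne, t, ht, heq⟩ := pvA_extra lines h
  rw [pvLoopA_eq lines _ 0 [] (by omega), List.drop_zero, List.nil_append, heq,
    ← (pvInvB lines).2.1]
  rw [(pvInvB lines).2.1]
  exact pvJoin_ne _ t hne ht

-- ---- D_remove_empty_headers (a char-level condition on text) is exactly pvDl of the split line list ----

theorem pv_mem_strip (cs : List Char) (x : Char) (h : x ∈ cs) (hx : PySem.Chars.isspace x = false) :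
    x ∈ PySem.Chars.strip cs := by
  have h1 : x ∈ PySem.Chars.lstrip cs := by
    unfold PySem.Chars.lstrip
    exact pv_mem_dropWhile _ _ _ h hx
  unfold PySem.Chars.strip PySem.Chars.rstrip
  rw [List.mem_reverse]
  exact pv_mem_dropWhile _ _ _ (List.mem_reverse.2 h1) hx

theorem pvStrip_nil_iff (cs : List Char) :
    PySem.Chars.strip cs = [] ↔ cs.all PySem.Chars.isspace = true := by
  constructor
  · intro h
    rw [List.all_eq_true]
    intro x hxm
    by_contra hc
    have hx : PySem.Chars.isspace x = false := by simpa using hc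
    have := pv_mem_strip cs x hxm hx
    rw [h] at this
    cases this
  · intro h
    have h1 : PySem.Chars.lstrip cs = [] := by
      unfold PySem.Chars.lstrip
      exact List.dropWhile_eq_nil_iff.2 (fun x hx => List.all_eq_true.1 h x hx)
    unfold PySem.Chars.strip
    rw [h1]
    rfl

theorem pvBlank_eq_all (l : String) : pvBlank l = l.toList.all PySem.Chars.isspace := by
  by_cases h : pvBlank l = true
  · rw [h, (pvStrip_nil_iff _).1 ((pvBlank_iff l).1 h)]
  · have hb : pvBlank l = false := by simpa using h
    rw [hb]
    symm
    rw [Bool.eq_false_iff]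
    intro hc
    exact h ((pvBlank_iff l).2 ((pvStrip_nil_iff _).2 hc))

theorem pvHdr_iff_prefix (l : String) : pvHdr l = true ↔ ['#', '#'] <+: l.toList := by
  unfold pvHdr
  rw [PySem.Str.startswith_eq, PySem.Chars.startswith_iff]
  exact Iff.rfl

theorem pvHeadD_map (xs : List String) :
    ((xs.map String.toList).headD []) = (xs.headD "").toList := by
  cases xs <;> rfl

-- spec of PySem.Chars.splitOn cs ['\n'] as plain structural recursion
def pvSp : List Char → List Char → List (List Char)
  | [], cur => [cur.reverse]
  | c :: rest, cur => if c = '\n' then cur.reverse :: pvSp rest [] else pvSp rest (c :: cur)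

theorem pvGo_eq (fuel : Nat) (l cur : List Char) (acc : List (List Char)) (h : l.length < fuel) :
    PySem.Chars.splitOn.go ['\n'] fuel l cur acc = acc.reverse ++ pvSp l cur := by
  induction fuel generalizing l cur acc with
  | zero => omega
  | succ fuel ih =>
    cases l with
    | nil =>
      rw [PySem.Chars.splitOn.go, pvSp]
      all_goals simp
    | cons c rest =>
      rw [PySem.Chars.splitOn.go, pvSp]
      by_cases hc : c = '\n'
      · subst hc
        rw [if_pos (by simp [List.isPrefixOf]), if_pos rfl]
        rw [show List.drop (['\n'] : List Char).length ('\n' :: rest) = rest from rfl]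
        rw [ih rest [] _ (by simp at h; omega)]
        simp
      · rw [if_neg (by simp [List.isPrefixOf]; exact fun h => hc h.symm), if_neg hc]
        exact ih rest (c :: cur) acc (by simp at h; omega)

theorem pvSplitOn_eq (cs : List Char) : PySem.Chars.splitOn cs ['\n'] = pvSp cs [] := by
  unfold PySem.Chars.splitOn
  rw [pvGo_eq _ _ _ _ (by omega)]
  rfl

theorem pvSp_ne_nil (l cur : List Char) : pvSp l cur ≠ [] := by
  induction l generalizing cur with
  | nil => rw [pvSp]; simp
  | cons c rest ih =>
    rw [pvSp]
    split
    · simp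
    · exact ih _

theorem pvSp_no_nl (l cur : List Char) (hcur : '\n' ∉ cur) :
    ∀ p ∈ pvSp l cur, '\n' ∉ p := by
  induction l generalizing cur with
  | nil =>
    rw [pvSp]
    intro p hp
    simp only [List.mem_singleton] at hp
    subst hp
    simpa using hcur
  | cons c rest ih =>
    rw [pvSp]
    by_cases hc : c = '\n'
    · subst hc
      rw [if_pos rfl]
      intro p hp
      rcases List.mem_cons.1 hp with rfl | hp2
      · simpa using hcur
      · exact ih [] (by simp) p hp2
    · rw [if_neg hc]
      refine ih (c :: cur) ?_
      intro hmem
      rcases List.mem_cons.1 hmem with h1 | h1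
      · exact hc h1.symm
      · exact hcur h1

theorem pvJoin_sp (l cur : List Char) :
    PySem.Chars.join ['\n'] (pvSp l cur) = cur.reverse ++ l := by
  induction l generalizing cur with
  | nil => rw [pvSp, PySem.Chars.join_singleton, List.append_nil]
  | cons c rest ih =>
    rw [pvSp]
    by_cases hc : c = '\n'
    · subst hc
      rw [if_pos rfl]
      obtain ⟨q, t, hqt⟩ : ∃ q t, pvSp rest [] = q :: t := by
        cases hs : pvSp rest [] with
        | nil => exact absurd hs (pvSp_ne_nil rest [])
        | cons q t => exact ⟨q, t, rfl⟩
      rw [hqt, PySem.Chars.join_cons_cons, ← hqt, ih []]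
      simp
    · rw [if_neg hc, ih (c :: cur)]
      simp

-- sep.join(xs ++ [y]) = sep.join(xs) ++ sep ++ y for nonempty xs
theorem pvJoin_snoc (sep y : List Char) (xs : List (List Char)) (hxs : xs ≠ []) :
    PySem.Chars.join sep (xs ++ [y]) = PySem.Chars.join sep xs ++ sep ++ y := by
  induction xs with
  | nil => cases hxs rfl
  | cons p t ih =>
    cases t with
    | nil =>
      rw [List.cons_append, List.nil_append, PySem.Chars.join_cons_cons,
        PySem.Chars.join_singleton, PySem.Chars.join_singleton]
    | cons q t' =>
      rw [show (p :: q :: t') ++ [y] = p :: q :: (t' ++ [y]) by simp,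
        PySem.Chars.join_cons_cons,
        show (q :: (t' ++ [y])) = (q :: t') ++ [y] by simp, ih (by simp),
        PySem.Chars.join_cons_cons]
      simp

theorem pvJoin_reverse (P : List (List Char)) (hP : P ≠ []) :
    (PySem.Chars.join ['\n'] P).reverse
      = PySem.Chars.join ['\n'] (P.reverse.map List.reverse) := by
  induction P with
  | nil => cases hP rfl
  | cons p t ih =>
    cases t with
    | nil =>
      rw [PySem.Chars.join_singleton]
      simp [PySem.Chars.join_singleton]
    | cons q t' =>
      have hx : (p :: q :: t').reverse.map List.reverse
          = ((q :: t').reverse.map List.reverse) ++ [p.reverse] := by simp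
      rw [PySem.Chars.join_cons_cons, hx, pvJoin_snoc _ _ _ (by simp), ← ih (by simp)]
      simp

def pvJn (R : List (List Char)) : List Char := PySem.Chars.join ['\n'] (R.map List.reverse)

-- the "## " test survives stripping trailing whitespace (phrased on the reversed line)
theorem pvPrefix_rstrip (p : List Char) :
    (['#', '#'] <+: (p.reverse.dropWhile PySem.Chars.isspace).reverse) ↔ ['#', '#'] <+: p := by
  constructor
  · intro h
    refine h.trans ?_
    have h2 := (List.reverse_prefix).2 (List.dropWhile_suffix (l := p.reverse) PySem.Chars.isspace)
    simpa using h2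
  · rintro ⟨t, ht⟩
    have key : ∀ x : List Char, (x ++ ['#', '#']).dropWhile PySem.Chars.isspace
        = x.dropWhile PySem.Chars.isspace ++ ['#', '#'] := by
      intro x
      rw [List.dropWhile_append]
      split
      · rename_i hemp
        rw [List.isEmpty_iff] at hemp
        rw [hemp, List.nil_append]
        decide
      · rfl
    rw [← ht, show (['#', '#'] ++ t : List Char).reverse = t.reverse ++ ['#', '#'] by simp, key,
      List.reverse_append]
    exact ⟨(t.reverse.dropWhile PySem.Chars.isspace).reverse, by simp⟩

theorem pvNoNl_dropWhile (p : List Char) (hnl : '\n' ∉ p) :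
    ∀ x ∈ p.reverse.dropWhile PySem.Chars.isspace, decide (x ≠ '\n') = true := by
  intro x hx
  have hxm : x ∈ p := List.mem_reverse.1 ((List.dropWhile_sublist _).mem hx)
  simp only [decide_eq_true_eq, ne_eq]
  intro hc
  subst hc
  exact hnl hxm

theorem pvAux (R : List (List Char)) (hnl : ∀ p ∈ R, '\n' ∉ p) :
    (['#', '#'] <+: (((pvJn R).dropWhile PySem.Chars.isspace).takeWhile (· ≠ '\n')).reverse) ↔
    (['#', '#'] <+: ((R.dropWhile (fun p => p.all PySem.Chars.isspace)).headD [])) := by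
  induction R with
  | nil => simp [pvJn, PySem.Chars.join_nil]
  | cons p rest ih =>
    by_cases hbp : p.all PySem.Chars.isspace = true
    · have hball : ∀ x ∈ p.reverse, PySem.Chars.isspace x = true := by
        intro x hx
        exact List.all_eq_true.1 hbp x (List.mem_reverse.1 hx)
      cases rest with
      | nil =>
        have hj : pvJn [p] = p.reverse := by
          simp [pvJn, PySem.Chars.join_singleton]
        rw [hj]
        rw [List.dropWhile_eq_nil_iff.2 hball]
        rw [List.dropWhile_cons, if_pos hbp]
        simp
      | cons q t =>
        have hj : pvJn (p :: q :: t) = p.reverse ++ '\n' :: pvJn (q :: t) := by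
          simp only [pvJn, List.map_cons, PySem.Chars.join_cons_cons]
          simp
        rw [hj, List.dropWhile_append,
          if_pos (by simp only [List.isEmpty_iff]; exact List.dropWhile_eq_nil_iff.2 hball),
          List.dropWhile_cons, if_pos (by decide)]
        rw [List.dropWhile_cons, if_pos hbp]
        exact ih (fun x hx => hnl x (List.mem_cons_of_mem p hx))
    · have hw : p.reverse.dropWhile PySem.Chars.isspace ≠ [] := by
        intro hc
        apply hbp
        rw [List.all_eq_true]
        intro x hx
        exact List.dropWhile_eq_nil_iff.1 hc x (List.mem_reverse.2 hx)
      have hrhs : (((p :: rest).dropWhile (fun p => p.all PySem.Chars.isspace)).headD []) = p := by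
        rw [List.dropWhile_cons, if_neg (by simp [hbp])]
        rfl
      rw [hrhs]
      have htw : ∀ u : List Char,
          ((p.reverse.dropWhile PySem.Chars.isspace ++ '\n' :: u).takeWhile (· ≠ '\n'))
            = p.reverse.dropWhile PySem.Chars.isspace := by
        intro u
        rw [List.takeWhile_append]
        rw [if_pos (by
          rw [List.takeWhile_eq_self_iff.2 (pvNoNl_dropWhile p (hnl p (by simp)))])]
        rw [List.takeWhile_cons, if_neg (by simp)]
        simp
      cases rest with
      | nil =>
        have hj : pvJn [p] = p.reverse := by
          simp [pvJn, PySem.Chars.join_singleton]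
        rw [hj]
        rw [List.takeWhile_eq_self_iff.2 ?hall]
        case hall =>
          intro x hx
          exact pvNoNl_dropWhile p (hnl p (by simp)) x hx
        exact pvPrefix_rstrip p
      | cons q t =>
        have hj : pvJn (p :: q :: t) = p.reverse ++ '\n' :: pvJn (q :: t) := by
          simp only [pvJn, List.map_cons, PySem.Chars.join_cons_cons]
          simp
        rw [hj, List.dropWhile_append, if_neg (by simpa using hw), htw]
        exact pvPrefix_rstrip p

theorem pvFull (R : List (List Char)) (hnl : ∀ p ∈ R, '\n' ∉ p) (hne : R ≠ []) :
    ('\n' ∈ (pvJn R).takeWhile PySem.Chars.isspace ∧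
      ['#', '#'] <+: (((pvJn R).dropWhile PySem.Chars.isspace).takeWhile (· ≠ '\n')).reverse) ↔
    ((R.headD []).all PySem.Chars.isspace = true ∧
      ['#', '#'] <+: ((R.dropWhile (fun p => p.all PySem.Chars.isspace)).headD [])) := by
  cases R with
  | nil => cases hne rfl
  | cons p rest =>
    have hpn : '\n' ∉ p := hnl p (by simp)
    by_cases hbp : p.all PySem.Chars.isspace = true
    · have hball : ∀ x ∈ p.reverse, PySem.Chars.isspace x = true := by
        intro x hx
        exact List.all_eq_true.1 hbp x (List.mem_reverse.1 hx)
      cases rest with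
      | nil =>
        have hj : pvJn [p] = p.reverse := by
          simp [pvJn, PySem.Chars.join_singleton]
        constructor
        · rintro ⟨h1, -⟩
          exfalso
          rw [hj] at h1
          exact hpn (List.mem_reverse.1 ((List.takeWhile_sublist _).mem h1))
        · rintro ⟨-, h2⟩
          exfalso
          rw [List.dropWhile_cons, if_pos hbp] at h2
          simp at h2
      | cons q t =>
        have hj : pvJn (p :: q :: t) = p.reverse ++ '\n' :: pvJn (q :: t) := by
          simp only [pvJn, List.map_cons, PySem.Chars.join_cons_cons]
          simp
        have hmem : '\n' ∈ (pvJn (p :: q :: t)).takeWhile PySem.Chars.isspace := by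
          rw [hj, List.takeWhile_append,
            if_pos (by rw [List.takeWhile_eq_self_iff.2 hball]),
            List.takeWhile_cons, if_pos (by decide)]
          exact List.mem_append_right _ (by simp)
        rw [show (p :: q :: t).headD [] = p from rfl]
        constructor
        · rintro ⟨-, h2⟩
          exact ⟨hbp, (pvAux (p :: q :: t) hnl).1 h2⟩
        · rintro ⟨-, h2⟩
          exact ⟨hmem, (pvAux (p :: q :: t) hnl).2 h2⟩
    · have hnot : '\n' ∉ (pvJn (p :: rest)).takeWhile PySem.Chars.isspace := by
        have hlen : ((p.reverse.takeWhile PySem.Chars.isspace).length = p.reverse.length) ↔ False := by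
          constructor
          · intro hl
            apply hbp
            have := List.takeWhile_eq_self_iff.1
              ((List.takeWhile_sublist (l := p.reverse) PySem.Chars.isspace).eq_of_length hl)
            rw [List.all_eq_true]
            intro x hx
            exact this x (List.mem_reverse.2 hx)
          · exact False.elim
        cases rest with
        | nil =>
          have hj : pvJn [p] = p.reverse := by
            simp [pvJn, PySem.Chars.join_singleton]
          rw [hj]
          intro hc
          exact hpn (List.mem_reverse.1 ((List.takeWhile_sublist _).mem hc))
        | cons q t =>
          have hj : pvJn (p :: q :: t) = p.reverse ++ '\n' :: pvJn (q :: t) := by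
            simp only [pvJn, List.map_cons, PySem.Chars.join_cons_cons]
            simp
          rw [hj, List.takeWhile_append, if_neg (by rw [← iff_false _]; exact hlen)]
          intro hc
          exact hpn (List.mem_reverse.1 ((List.takeWhile_sublist _).mem hc))
      rw [show ((p :: rest).headD []).all PySem.Chars.isspace = p.all PySem.Chars.isspace from rfl]
      constructor
      · rintro ⟨h1, -⟩
        exact absurd h1 hnot
      · rintro ⟨h1, -⟩
        exact absurd h1 hbp

theorem pvGetD_headD (xs : List String) (hne : xs ≠ []) : xs.getD 0 "x" = xs.headD "" := by
  cases xs with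
  | nil => cases hne rfl
  | cons a t => rfl

theorem pvD_iff (text : String) :
    D_remove_empty_headers text ↔ pvDl ((PySem.Str.split? text "\n").getD []) := by
  set lines := (PySem.Str.split? text "\n").getD [] with hlines
  have hsplit : PySem.Chars.splitOn text.toList ['\n'] = lines.map String.toList := by
    have h1 := PySem.Str.split?_map text "\n"
    have h2 : PySem.Chars.split? text.toList "\n".toList
        = some (PySem.Chars.splitOn text.toList "\n".toList) := by
      simp [PySem.Chars.split?]
    rw [h2] at h1
    cases hs : PySem.Str.split? text "\n" with
    | none => rw [hs] at h1; simp at h1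
    | some ls =>
      rw [hs] at h1
      simp only [Option.map_some, Option.some_inj] at h1
      rw [hlines, hs, Option.getD_some]
      exact h1.symm
  have hsp : pvSp text.toList [] = lines.map String.toList := by
    rw [← pvSplitOn_eq]
    exact hsplit
  have hPne : lines.map String.toList ≠ [] := by
    rw [← hsp]
    exact pvSp_ne_nil _ _
  have hlne : lines ≠ [] := by
    intro hc
    rw [hc] at hPne
    exact hPne rfl
  have hjoin : PySem.Chars.join ['\n'] (lines.map String.toList) = text.toList := by
    rw [← hsp, pvJoin_sp]
    rfl
  have hrev : text.toList.reverse = pvJn ((lines.map String.toList).reverse) := by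
    rw [← hjoin, pvJoin_reverse _ hPne]
    rfl
  have hnl : ∀ p ∈ (lines.map String.toList).reverse, '\n' ∉ p := by
    intro p hp
    exact pvSp_no_nl text.toList [] (by simp) p (by rw [hsp]; exact List.mem_reverse.1 hp)
  have hmain := pvFull ((lines.map String.toList).reverse) hnl (by simpa using hPne)
  unfold D_remove_empty_headers
  rw [hrev]
  rw [hmain]
  have hmr : (lines.map String.toList).reverse = lines.reverse.map String.toList := by
    rw [List.map_reverse]
  rw [hmr]
  unfold pvDl
  apply and_congr
  · rw [pvHeadD_map, ← pvBlank_eq_all, pvGetD_headD _ (by simpa using hlne)]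
  · have hdm : (lines.reverse.map String.toList).dropWhile (fun p => p.all PySem.Chars.isspace)
        = (lines.reverse.dropWhile pvBlank).map String.toList := by
      have hfun : ((fun p : List Char => p.all PySem.Chars.isspace) ∘ String.toList) = pvBlank := by
        funext s
        exact (pvBlank_eq_all s).symm
      rw [List.dropWhile_map, hfun]
    rw [hdm, pvHeadD_map]
    exact (pvHdr_iff_prefix _).symm

-- ===== VERDICT (by name: the statement is the Claim_ definition above) =====
theorem remove_empty_headers_spec : Claim_unchanged_remove_empty_headers := by
  intro text _ hD
  show remove_empty_headers text = remove_empty_headers_alt text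
  unfold remove_empty_headers remove_empty_headers_alt
  exact pvMain_eq _ (fun hc => hD ((pvD_iff text).2 hc))

theorem remove_empty_headers_changed : Claim_changed_remove_empty_headers := by
  unfold Claim_changed_remove_empty_headers
  decide

theorem remove_empty_headers_tight : Claim_exact_remove_empty_headers := by
  intro text _ hD
  show remove_empty_headers text ≠ remove_empty_headers_alt text
  unfold remove_empty_headers remove_empty_headers_alt
  exact pvMain_ne _ ((pvD_iff text).1 hD)
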